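-- pv_equiv track=rewrite | github.com/MrBrantCode/unitest_baseline | mut_generate/mist_train_taco/taco_12663/solution.py | find_minimum_adjustment
-- ===== SOURCE A (Python) =====
-- def find_minimum_adjustment(intervals):
--     """
--     Calculate the minimum value of the sum of all adjustments (d_i) needed to make all metronomes tick in unison at the shortest interval.
--
--     Parameters:
--     intervals (list of int): A list of integers representing the preset ticking intervals of the metronomes.
--
--     Returns:
--     int: The minimum value of the sum of all adjustments.
--     """
--     n = len(intervals)
--     max_t = max(intervals)
--
--     # Find all divisors of max_t
--     divisors = []
--     for i in range(1, (max_t // 2) + 1):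
--         if max_t % i == 0:
--             divisors.append(i)
--     divisors.append(max_t)
--
--     # Calculate the minimum adjustment
--     adj = 0
--     for t in intervals:
--         for d in divisors:
--             if d >= t:
--                 adj += d - t
--                 break
--
--     return adj
-- ===== SOURCE B (Python) =====
-- def find_minimum_adjustment(intervals):
--     """Alternative exact re-implementation: enumerate the divisors of
--     max(intervals) by sqrt pairing, sort the intervals, and sweep one monotone
--     pointer over the ascending divisor list; the sum of nearest divisors minus
--     sum(intervals) is the answer (the per-interval gap is order-independent)."""
--     max_t = max(intervals)
--     small = []
--     large = []
--     i = 1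
--     while i * i <= max_t:
--         if max_t % i == 0:
--             small.append(i)
--             if i * i != max_t:
--                 large.append(max_t // i)
--         i += 1
--     divs = small + large[::-1]  # all divisors of max_t, ascending
--     total = 0
--     p = 0
--     d = divs[0]
--     for t in sorted(intervals):
--         while d < t:
--             p += 1
--             d = divs[p]
--         total += d
--     return total - sum(intervals)
-- ===== Notes on version B (the rewrite author's own statement) =====
-- stated objective: alternative
-- what changed: B enumerates the divisors of max(intervals) by sqrt pairing instead of scanning 1..max//2, sorts the intervals, and replaces A's per-interval rescan of the divisor list by a single monotone pointer sweep, returning the sum of nearest divisors minus sum(intervals); it trades A's O(max_t) divisor build and per-element rescan for a sort.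
-- outside the precondition, e.g. on find_minimum_adjustment([-3, -5]): A returns 2, B raises IndexError; on find_minimum_adjustment([0]): A returns 0, B raises IndexError
import Mathlib
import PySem

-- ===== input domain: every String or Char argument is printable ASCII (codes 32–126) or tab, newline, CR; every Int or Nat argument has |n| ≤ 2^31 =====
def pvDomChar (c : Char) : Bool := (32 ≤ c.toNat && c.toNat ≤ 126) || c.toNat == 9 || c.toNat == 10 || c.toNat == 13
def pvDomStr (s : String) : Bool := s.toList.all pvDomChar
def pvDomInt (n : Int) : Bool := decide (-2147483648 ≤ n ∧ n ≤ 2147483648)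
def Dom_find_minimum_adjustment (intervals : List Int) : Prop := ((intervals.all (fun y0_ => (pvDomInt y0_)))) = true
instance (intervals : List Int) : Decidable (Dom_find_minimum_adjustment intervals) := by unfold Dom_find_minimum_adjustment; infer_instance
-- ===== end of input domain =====

-- B replaces A's O(max_t) divisor scan and per-interval rescan by sqrt-pairing
-- divisor enumeration plus one monotone pointer sweep over the sorted intervals
-- (objective: alternative algorithm, same measured cost).


-- ===== PORT A =====
-- 'for d in divisors: if d >= t: adj += d - t; break'  — first divisor ≥ t, if any
def pvFirstGe : List Int → Int → Option Int
  | [], _ => none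
  | d :: ds, t => if t ≤ d then some d else pvFirstGe ds t

def find_minimum_adjustment (intervals : List Int) : Int :=
  let max_t := (PySem.List.max? intervals (fun x => x)).getD 0
  let divisors := (PySem.List.pyRange 1 (PySem.Int.floordiv max_t 2 + 1) 1).foldl
      (fun acc i => if PySem.Int.mod max_t i == 0 then acc ++ [i] else acc) []
  let divisors := divisors ++ [max_t]
  intervals.foldl (fun adj t =>
    match pvFirstGe divisors t with
    | some d => adj + (d - t)
    | none => adj) 0

-- ===== PORT B =====
-- the 'while i * i <= max_t' loop of Source B (the '1 ≤ i' guard only makes it total;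
-- the loop is entered at i = 1 and i only increases)
def pvDivLoop (max_t : Int) (i : Int) (small large : List Int) : List Int × List Int :=
  if h : 1 ≤ i ∧ i * i ≤ max_t then
    if PySem.Int.mod max_t i == 0 then
      if i * i != max_t then
        pvDivLoop max_t (i + 1) (small ++ [i]) (large ++ [PySem.Int.floordiv max_t i])
      else
        pvDivLoop max_t (i + 1) (small ++ [i]) large
    else
      pvDivLoop max_t (i + 1) small large
  else
    (small, large)
termination_by (max_t + 1 - i).toNat
decreasing_by
  all_goals
    have h1 : i ≤ max_t := by nlinarith [h.1, h.2]
    omega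

-- the 'while d < t: p += 1; d = divs[p]' pointer advance of Source B (the
-- 'p < divs.length' part of the guard only makes it total; inside Pre_ the scan
-- always stops at the divisor max_t itself)
def pvAdvance (divs : List Int) (t : Int) (p : Nat) (d : Int) : Nat × Int :=
  if h : d < t ∧ p < divs.length then
    pvAdvance divs t (p + 1) (divs.getD (p + 1) 0)
  else (p, d)
termination_by divs.length - p
decreasing_by omega

def find_minimum_adjustment_alt (intervals : List Int) : Int :=
  let max_t := (PySem.List.max? intervals (fun x => x)).getD 0
  let p0 := pvDivLoop max_t 1 [] []
  let divs := p0.1 ++ p0.2.reverse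
  let r := (PySem.List.sorted intervals (fun x => x)).foldl
    (fun acc t =>
      let pd := pvAdvance divs t acc.2.1 acc.2.2
      (acc.1 + pd.2, pd.1, pd.2))
    (0, 0, divs.getD 0 0)
  r.1 - intervals.sum

-- ===== PRECONDITION & SPEC =====
-- Pre_ excludes the empty list (A's max() raises ValueError) and lists whose maximum
-- is ≤ 0, where "the divisors of max" is ill-defined: A accidentally treats max itself
-- as the only divisor and returns a value, while B's divisor enumeration finds no
-- divisors and raises IndexError.
def Pre_find_minimum_adjustment (intervals : List Int) : Prop :=
  ∃ x ∈ intervals, 1 ≤ x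
instance (intervals : List Int) : Decidable (Pre_find_minimum_adjustment intervals) := by
  unfold Pre_find_minimum_adjustment; infer_instance

def pvWitness_find_minimum_adjustment : List Int := [2, 3, 5]

def Spec_find_minimum_adjustment (intervals : List Int) (out : Int) : Prop :=
  out = find_minimum_adjustment_alt intervals
instance (intervals : List Int) (out : Int) : Decidable (Spec_find_minimum_adjustment intervals out) := by
  unfold Spec_find_minimum_adjustment; infer_instance

-- ===== CLAIM (what is proved, stated in full; the proofs are below) =====
def Claim_equal_find_minimum_adjustment : Prop :=
  ∀ (intervals : List Int), Dom_find_minimum_adjustment intervals →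
    Pre_find_minimum_adjustment intervals →
    Spec_find_minimum_adjustment intervals (find_minimum_adjustment intervals)

-- ===== LEMMAS AND PROOFS =====

-- the ascending list of all (positive) divisors of m
def pvDivs (m : Int) : List Int :=
  (PySem.List.pyRange 1 (m + 1) 1).filter (fun d => PySem.Int.mod m d == 0)

theorem pvDivs_mem (m x : Int) (_hm : 1 ≤ m) :
    x ∈ pvDivs m ↔ 1 ≤ x ∧ x ≤ m ∧ x ∣ m := by
  unfold pvDivs
  simp only [List.mem_filter, PySem.List.mem_pyRange_one, beq_iff_eq,
    PySem.Int.mod_eq_zero_iff_dvd]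
  constructor
  · rintro ⟨⟨h1, h2⟩, h3⟩; exact ⟨h1, by omega, h3⟩
  · rintro ⟨h1, h2, h3⟩; exact ⟨⟨h1, by omega⟩, h3⟩

theorem pvDivs_sorted (m : Int) : (pvDivs m).Pairwise (· < ·) := by
  exact (PySem.List.pairwise_lt_pyRange_one 1 (m + 1)).filter _

theorem pvFoldlApp (p : Int → Bool) :
    ∀ (l : List Int) (acc : List Int),
      l.foldl (fun acc i => if p i then acc ++ [i] else acc) acc = acc ++ l.filter p
  | [], acc => by simp
  | x :: xs, acc => by
    by_cases h : p x <;> simp [List.foldl_cons, h, pvFoldlApp p xs]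

-- A's divisor list equals pvDivs
theorem divsA_eq (m : Int) (hm : 1 ≤ m) :
    ((PySem.List.pyRange 1 (PySem.Int.floordiv m 2 + 1) 1).foldl
      (fun acc i => if PySem.Int.mod m i == 0 then acc ++ [i] else acc) []) ++ [m]
    = pvDivs m := by
  have h0 : (0 : Int) ≤ PySem.Int.floordiv m 2 :=
    (PySem.Int.le_floordiv_iff_mul_le (a := m) (b := 2) (q := 0) (by omega)).mpr (by omega)
  have hlt : PySem.Int.floordiv m 2 < m := by
    have := (PySem.Int.le_floordiv_iff_mul_le (a := m) (b := 2) (q := m) (by omega))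
    by_contra hc
    have h2 : m * 2 ≤ m := this.mp (by omega); omega
  rw [pvFoldlApp, List.nil_append]
  unfold pvDivs
  rw [PySem.List.pyRange_one_append 1 (PySem.Int.floordiv m 2 + 1) (m + 1) (by omega) (by omega),
    List.filter_append]
  congr 1
  rw [PySem.List.pyRange_one_append (PySem.Int.floordiv m 2 + 1) m (m + 1) (by omega) (by omega),
    List.filter_append]
  have h1 : (PySem.List.pyRange (PySem.Int.floordiv m 2 + 1) m).filter
      (fun d => PySem.Int.mod m d == 0) = [] := by
    rw [List.filter_eq_nil_iff]
    intro a ha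
    rw [PySem.List.mem_pyRange_one] at ha
    simp only [beq_iff_eq, PySem.Int.mod_eq_zero_iff_dvd]
    intro hdvd
    obtain ⟨k, hk⟩ := hdvd
    have ha1 : 1 ≤ a := by omega
    have hk2 : 2 ≤ k := by nlinarith
    have : a * 2 ≤ m := by nlinarith
    have : a ≤ PySem.Int.floordiv m 2 := by
      rw [PySem.Int.le_floordiv_iff_mul_le (by omega)]; omega
    omega
  rw [h1, List.nil_append]
  have : PySem.List.pyRange m (m + 1) = [m] := by
    rw [PySem.List.pyRange_one_cons (by omega), PySem.List.pyRange_one_eq_nil (by omega)]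
  rw [this]
  simp [PySem.Int.mod_eq_zero_iff_dvd]

-- small divisors (those with j*j ≤ m) not yet processed at loop counter i
def pvSl (m i : Int) : List Int :=
  (PySem.List.pyRange i (m + 1) 1).filter
    (fun j => decide (j * j ≤ m) && (PySem.Int.mod m j == 0))

-- cofactors of the small divisors below the square root, in order of discovery
def pvLh (m i : Int) : List Int :=
  ((PySem.List.pyRange i (m + 1) 1).filter
    (fun j => decide (j * j ≤ m) && (PySem.Int.mod m j == 0) && !(j * j == m))).map
    (fun j => PySem.Int.floordiv m j)

theorem pvDivLoop_spec (m : Int) (hm : 1 ≤ m) :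
    ∀ (n : Nat) (i : Int) (s l : List Int), 1 ≤ i → (m + 1 - i).toNat = n →
      pvDivLoop m i s l = (s ++ pvSl m i, l ++ pvLh m i) := by
  intro n
  induction n using Nat.strong_induction_on with
  | _ n ih =>
    intro i s l hi hn
    rw [pvDivLoop]
    by_cases hcond : 1 ≤ i ∧ i * i ≤ m
    · rw [dif_pos hcond]
      have him : i ≤ m := by nlinarith [hcond.1, hcond.2]
      have hrange : PySem.List.pyRange i (m + 1) 1 = i :: PySem.List.pyRange (i + 1) (m + 1) 1 :=
        PySem.List.pyRange_one_cons (by omega)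
      have hSl : pvSl m i =
          if (decide (i * i ≤ m) && (PySem.Int.mod m i == 0)) then i :: pvSl m (i + 1)
          else pvSl m (i + 1) := by
        unfold pvSl; rw [hrange, List.filter_cons]
      have hLh : pvLh m i =
          if (decide (i * i ≤ m) && (PySem.Int.mod m i == 0) && !(i * i == m)) then
            PySem.Int.floordiv m i :: pvLh m (i + 1)
          else pvLh m (i + 1) := by
        unfold pvLh; rw [hrange, List.filter_cons]
        by_cases h : (decide (i * i ≤ m) && (PySem.Int.mod m i == 0) && !(i * i == m)) = true <;>
          simp [h]
      have hrec := ih ((m + 1 - (i + 1)).toNat) (by omega) (i + 1)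
      by_cases hP : PySem.Int.mod m i = 0
      · by_cases hQ : i * i = m
        · rw [if_pos (by simp [hP]), if_neg (by simp [hQ])]
          rw [hrec (s ++ [i]) l (by omega) rfl]
          rw [hSl, if_pos (by simp [hP, hcond.2]), hLh, if_neg (by simp [hQ])]
          simp
        · rw [if_pos (by simp [hP]), if_pos (by simp [hQ])]
          rw [hrec (s ++ [i]) (l ++ [PySem.Int.floordiv m i]) (by omega) rfl]
          rw [hSl, if_pos (by simp [hP, hcond.2]), hLh, if_pos (by simp [hP, hQ, hcond.2])]
          simp
      · rw [if_neg (by simp [hP])]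
        rw [hrec s l (by omega) rfl]
        rw [hSl, if_neg (by simp [hP]), hLh, if_neg (by simp [hP])]
    · rw [dif_neg hcond]
      have hgt : m < i * i := by
        rcases not_and_or.mp hcond with h | h
        · omega
        · omega
      have hnil : ∀ j : Int, j ∈ PySem.List.pyRange i (m + 1) 1 → ¬ (j * j ≤ m) := by
        intro j hj
        rw [PySem.List.mem_pyRange_one] at hj
        have : i * i ≤ j * j := by nlinarith
        omega
      have hSl : pvSl m i = [] := by
        unfold pvSl
        rw [List.filter_eq_nil_iff]
        intro a ha
        simp [hnil a ha]
      have hLh : pvLh m i = [] := by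
        unfold pvLh
        rw [List.map_eq_nil_iff, List.filter_eq_nil_iff]
        intro a ha
        simp [hnil a ha]
      rw [hSl, hLh]
      simp

-- the exact cofactor of a divisor
theorem pvCofactor (m j : Int) (_hm : 1 ≤ m) (hj : 1 ≤ j) (k : Int) (hk : m = j * k) :
    PySem.Int.floordiv m j = k := by
  rw [PySem.Int.floordiv_eq_ediv_of_pos (by omega), hk,
    Int.mul_ediv_cancel_left _ (by omega : j ≠ 0)]

-- B's divisor list equals pvDivs
theorem divsB_eq (m : Int) (hm : 1 ≤ m) :
    (pvDivLoop m 1 [] []).1 ++ (pvDivLoop m 1 [] []).2.reverse = pvDivs m := by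
  rw [pvDivLoop_spec m hm ((m + 1 - 1).toNat) 1 [] [] (le_refl 1) rfl]
  simp only [List.nil_append]
  -- membership characterisations
  have hmemS : ∀ x : Int, x ∈ pvSl m 1 ↔ 1 ≤ x ∧ x * x ≤ m ∧ x ∣ m := by
    intro x
    unfold pvSl
    simp only [List.mem_filter, PySem.List.mem_pyRange_one, Bool.and_eq_true, decide_eq_true_eq,
      beq_iff_eq, PySem.Int.mod_eq_zero_iff_dvd]
    constructor
    · rintro ⟨⟨h1, _⟩, h2, h3⟩; exact ⟨h1, h2, h3⟩
    · rintro ⟨h1, h2, h3⟩; exact ⟨⟨h1, by nlinarith⟩, h2, h3⟩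
  have hmemL : ∀ x : Int, x ∈ pvLh m 1 ↔
      ∃ j : Int, 1 ≤ j ∧ j * j ≤ m ∧ j ∣ m ∧ j * j ≠ m ∧ x = PySem.Int.floordiv m j := by
    intro x
    unfold pvLh
    simp only [List.mem_map, List.mem_filter, PySem.List.mem_pyRange_one, Bool.and_eq_true,
      decide_eq_true_eq, beq_iff_eq, PySem.Int.mod_eq_zero_iff_dvd, Bool.not_eq_eq_eq_not,
      Bool.not_true, beq_eq_false_iff_ne, ne_eq]
    constructor
    · rintro ⟨j, ⟨⟨h1, _⟩, ⟨h2, h3⟩, h4⟩, h5⟩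
      exact ⟨j, h1, h2, h3, h4, h5.symm⟩
    · rintro ⟨j, h1, h2, h3, h4, h5⟩
      exact ⟨j, ⟨⟨h1, by nlinarith⟩, ⟨h2, h3⟩, h4⟩, h5.symm⟩
  -- all members are strictly sorted
  have hsortS : (pvSl m 1).Pairwise (· < ·) :=
    (PySem.List.pairwise_lt_pyRange_one 1 (m + 1)).filter _
  have hsortL : ((pvLh m 1).reverse).Pairwise (· < ·) := by
    rw [List.pairwise_reverse]
    unfold pvLh
    rw [List.pairwise_map]
    refine ((PySem.List.pairwise_lt_pyRange_one 1 (m + 1)).filter _).imp_of_mem ?_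
    intro a b ha hb hab
    simp only [List.mem_filter, PySem.List.mem_pyRange_one, Bool.and_eq_true, decide_eq_true_eq,
      beq_iff_eq, PySem.Int.mod_eq_zero_iff_dvd] at ha hb
    obtain ⟨⟨ha1, _⟩, ⟨_, ha3⟩, _⟩ := ha
    obtain ⟨⟨hb1, _⟩, ⟨_, hb3⟩, _⟩ := hb
    obtain ⟨ka, hka⟩ := ha3
    obtain ⟨kb, hkb⟩ := hb3
    rw [pvCofactor m a hm ha1 ka hka, pvCofactor m b hm hb1 kb hkb]
    have hkb1 : 1 ≤ kb := by nlinarith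
    have heq : a * ka = b * kb := by linarith
    have h1 : a * kb < b * kb := by nlinarith
    have h2 : a * kb < a * ka := by linarith
    exact lt_of_mul_lt_mul_left h2 (by linarith)
  have hcross : ∀ x ∈ pvSl m 1, ∀ y ∈ (pvLh m 1).reverse, x < y := by
    intro x hx y hy
    rw [hmemS] at hx
    rw [List.mem_reverse, hmemL] at hy
    obtain ⟨hx1, hx2, _⟩ := hx
    obtain ⟨j, hj1, hj2, hj3, hj4, rfl⟩ := hy
    obtain ⟨k, hk⟩ := hj3
    rw [pvCofactor m j hm hj1 k hk]
    have hk1 : 1 ≤ k := by nlinarith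
    have hjm : j * j < m := lt_of_le_of_ne hj2 hj4
    have hjk : j < k := by nlinarith
    have hkk : m < k * k := by nlinarith
    by_contra hc
    have hc' : k ≤ x := by omega
    have h1 : k * k ≤ x * k := mul_le_mul_of_nonneg_right hc' (by linarith)
    have h2 : x * k ≤ x * x := mul_le_mul_of_nonneg_left hc' (by linarith)
    linarith
  have hsortB : (pvSl m 1 ++ (pvLh m 1).reverse).Pairwise (· < ·) :=
    List.pairwise_append.mpr ⟨hsortS, hsortL, hcross⟩
  -- same members as pvDivs
  have hmem : ∀ x : Int, x ∈ pvSl m 1 ++ (pvLh m 1).reverse ↔ x ∈ pvDivs m := by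
    intro x
    rw [List.mem_append, List.mem_reverse, hmemS, hmemL, pvDivs_mem m x hm]
    constructor
    · rintro (⟨h1, h2, h3⟩ | ⟨j, hj1, hj2, hj3, hj4, rfl⟩)
      · exact ⟨h1, by nlinarith, h3⟩
      · obtain ⟨k, hk⟩ := hj3
        rw [pvCofactor m j hm hj1 k hk]
        refine ⟨by nlinarith, by nlinarith, ⟨j, by rw [hk]; ring⟩⟩
    · rintro ⟨h1, h2, h3⟩
      by_cases hx : x * x ≤ m
      · exact Or.inl ⟨h1, hx, h3⟩
      · right
        obtain ⟨k, hk⟩ := h3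
        have hk1 : 1 ≤ k := by nlinarith
        refine ⟨k, hk1, by nlinarith, ⟨x, by rw [hk]; ring⟩, by nlinarith, ?_⟩
        rw [pvCofactor m k hm hk1 x (by rw [hk]; ring)]
  -- strictly sorted lists with the same members are equal
  have hperm : (pvSl m 1 ++ (pvLh m 1).reverse).Perm (pvDivs m) :=
    List.perm_of_nodup_nodup_toFinset_eq
      (hsortB.imp (fun h => ne_of_lt h))
      ((pvDivs_sorted m).imp (fun h => ne_of_lt h))
      (Finset.ext fun x => by simp only [List.mem_toFinset]; exact hmem x)
  have hs := PySem.List.sorted_eq_of_perm_of_pairwise_lt (pvDivs m)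
    (pvSl m 1 ++ (pvLh m 1).reverse) (fun x => x) hperm hsortB
  rw [← hs, PySem.List.sorted_eq_self_of_pairwise _ _
    ((pvDivs_sorted m).imp (fun h => le_of_lt h))]

-- first-match scan returns the element at the first index whose value is ≥ t
theorem pvFirstGe_eq (divs : List Int) (t : Int) (k : Nat) (hk : k < divs.length)
    (hlt : ∀ j (hj : j < divs.length), j < k → divs[j] < t) (hge : t ≤ divs[k]) :
    pvFirstGe divs t = some divs[k] := by
  induction divs generalizing k with
  | nil => simp at hk
  | cons d ds ih =>
    match k with
    | 0 =>
      show (if t ≤ d then some d else pvFirstGe ds t) = some (d :: ds)[0]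
      rw [if_pos (by simpa using hge)]; rfl
    | k + 1 =>
      have hd : d < t := hlt 0 (by simp) (by omega)
      have hrec := ih k (by simpa using hk)
        (fun j hj hjk => by
          have := hlt (j + 1) (by simpa using Nat.succ_lt_succ hj) (by omega)
          simpa using this)
        (by simpa using hge)
      show (if t ≤ d then some d else pvFirstGe ds t) = some (d :: ds)[k + 1]
      rw [if_neg (by omega)]
      simpa using hrec

-- pvFirstGe returns some value as soon as the list has an element ≥ t
theorem pvFirstGe_isSome (divs : List Int) (t : Int) (hex : ∃ x ∈ divs, t ≤ x) :
    ∃ dv, pvFirstGe divs t = some dv := by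
  induction divs with
  | nil => simp at hex
  | cons d ds ih =>
    by_cases hd : t ≤ d
    · exact ⟨d, by simp [pvFirstGe, hd]⟩
    · obtain ⟨x, hx, htx⟩ := hex
      have hxds : x ∈ ds := by
        rcases List.mem_cons.mp hx with rfl | h
        · omega
        · exact h
      obtain ⟨dv, hdv⟩ := ih ⟨x, hxds, htx⟩
      exact ⟨dv, by simpa [pvFirstGe, hd] using hdv⟩

-- pointer advance finds the first index whose value is ≥ t
theorem pvAdvance_spec (divs : List Int) (t : Int)
    (hex : ∃ idx, ∃ _ : idx < divs.length, t ≤ divs[idx]) :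
    ∀ (n p : Nat) (d : Int) (_ : divs.length - p = n) (hp : p < divs.length)
      (_ : d = divs[p])
      (_ : ∀ j (hj : j < divs.length), j < p → divs[j] < t),
      ∃ k, ∃ hk : k < divs.length, pvAdvance divs t p d = (k, divs[k]) ∧
        (∀ j (hj : j < divs.length), j < k → divs[j] < t) ∧ t ≤ divs[k] := by
  intro n
  induction n using Nat.strong_induction_on with
  | _ n ih =>
    intro p d hn hp hd hpre
    rw [pvAdvance]
    by_cases hdt : d < t
    · rw [dif_pos ⟨hdt, hp⟩]
      have hpre' : ∀ j (hj : j < divs.length), j < p + 1 → divs[j] < t := by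
        intro j hj hjp
        rcases Nat.lt_or_ge j p with h | h
        · exact hpre j hj h
        · have : j = p := by omega
          subst this; rw [← hd]; exact hdt
      have hp1 : p + 1 < divs.length := by
        obtain ⟨idx, hidx, hti⟩ := hex
        by_contra hc
        have : idx < p + 1 := by omega
        have := hpre' idx hidx this
        omega
      exact ih (divs.length - (p + 1)) (by omega) (p + 1) _ rfl hp1
        (List.getD_eq_getElem divs 0 hp1) hpre'
    · rw [dif_neg (fun hc => hdt hc.1)]
      exact ⟨p, hp, by rw [hd], hpre, by rw [hd] at hdt; omega⟩

-- the sweep over an ascending list accumulates the nearest-divisor values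
theorem pvFoldB (divs : List Int) (mx : Int) (hmx : mx ∈ divs) :
    ∀ (xs : List Int), xs.Pairwise (· ≤ ·) → (∀ t ∈ xs, t ≤ mx) →
      ∀ (total : Int) (p : Nat) (d : Int) (hp : p < divs.length) (_ : d = divs[p])
        (_ : ∀ t ∈ xs, ∀ j (hj : j < divs.length), j < p → divs[j] < t),
        ∃ (p' : Nat) (d' : Int),
          xs.foldl (fun acc t =>
              let pd := pvAdvance divs t acc.2.1 acc.2.2
              (acc.1 + pd.2, pd.1, pd.2)) (total, p, d)
            = (total + (xs.map (fun t => (pvFirstGe divs t).getD 0)).sum, p', d') := by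
  intro xs
  induction xs with
  | nil => intro _ _ total p d hp hd _; exact ⟨p, d, by simp⟩
  | cons t rest ih =>
    intro hsort hle total p d hp hd hpre
    obtain ⟨idxm, hidxm, hidxe⟩ := List.getElem_of_mem hmx
    have hex : ∃ idx, ∃ _ : idx < divs.length, t ≤ divs[idx] :=
      ⟨idxm, hidxm, by rw [hidxe]; exact hle t (by simp)⟩
    obtain ⟨k, hk, hadv, hklt, hkge⟩ :=
      pvAdvance_spec divs t hex (divs.length - p) p d rfl hp hd
        (fun j hj hjp => hpre t (by simp) j hj hjp)
    have hG : (pvFirstGe divs t).getD 0 = divs[k] := by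
      rw [pvFirstGe_eq divs t k hk hklt hkge]; rfl
    have hrest := ih (List.Pairwise.sublist (List.sublist_cons_self t rest) hsort)
      (fun t' ht' => hle t' (by simp [ht']))
      (total + divs[k]) k divs[k] hk rfl
      (fun t' ht' j hj hjk => by
        have h1 : divs[j] < t := hklt j hj hjk
        have h2 : t ≤ t' := (List.pairwise_cons.mp hsort).1 t' ht'
        omega)
    obtain ⟨p', d', hfold⟩ := hrest
    refine ⟨p', d', ?_⟩
    simp only [List.foldl_cons, hadv, List.map_cons, List.sum_cons]
    rw [hfold, hG]
    ring_nf

-- foldl of successive additions is the sum of the mapped list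
theorem pvFoldlAddSum (f : Int → Int) :
    ∀ (l : List Int) (a : Int),
      l.foldl (fun acc x => acc + f x) a = a + (l.map f).sum
  | [], a => by simp
  | x :: xs, a => by
    simp [List.foldl_cons, pvFoldlAddSum f xs (a + f x)]
    ring

theorem pvSumMapSub (f : Int → Int) :
    ∀ l : List Int, (l.map (fun t => f t - t)).sum = (l.map f).sum - l.sum
  | [] => by simp
  | x :: xs => by
    simp [pvSumMapSub f xs]
    ring

-- ===== VERDICT (by name: the statement is the Claim_ definition above) =====
theorem find_minimum_adjustment_spec : Claim_equal_find_minimum_adjustment := by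
  intro intervals _ hpre
  unfold Spec_find_minimum_adjustment
  obtain ⟨w, hw, hw1⟩ := hpre
  obtain ⟨mx, hmx⟩ : ∃ mx, PySem.List.max? intervals (fun x => x) = some mx := by
    cases h : PySem.List.max? intervals (fun x => x) with
    | none =>
      rw [PySem.List.max?_eq_none_iff] at h
      subst h; simp at hw
    | some mx => exact ⟨mx, rfl⟩
  have hmax : ∀ y ∈ intervals, y ≤ mx := PySem.List.max?_isMax hmx
  have hm1 : 1 ≤ mx := le_trans hw1 (hmax w hw)
  simp only [find_minimum_adjustment, find_minimum_adjustment_alt, hmx, Option.getD_some]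
  rw [divsA_eq mx hm1, divsB_eq mx hm1]
  have hmxd : mx ∈ pvDivs mx := (pvDivs_mem mx mx hm1).mpr ⟨hm1, le_refl _, dvd_refl _⟩
  have hlen : 0 < (pvDivs mx).length := List.length_pos_of_mem hmxd
  -- A's fold is the sum of (nearest divisor - t) over intervals
  have hA : intervals.foldl (fun adj t =>
      match pvFirstGe (pvDivs mx) t with
      | some d => adj + (d - t)
      | none => adj) 0
      = (intervals.map (fun t => (pvFirstGe (pvDivs mx) t).getD 0)).sum - intervals.sum := by
    rw [PySem.List.foldl_congr_mem intervals _
      (fun adj t => adj + ((pvFirstGe (pvDivs mx) t).getD 0 - t)) 0 ?_]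
    · rw [pvFoldlAddSum, pvSumMapSub]
      ring
    · intro acc t ht
      obtain ⟨idx, hidx, hidxe⟩ := List.getElem_of_mem hmxd
      obtain ⟨dv, hdv⟩ := pvFirstGe_isSome (pvDivs mx) t
        ⟨mx, hmxd, hmax t ht⟩
      rw [hdv]
      simp [hdv]
  rw [hA]
  -- B's sweep over the sorted intervals accumulates the same nearest divisors
  have hsortx : (PySem.List.sorted intervals (fun x => x)).Pairwise (· ≤ ·) :=
    PySem.List.sorted_pairwise intervals (fun x => x)
  have hlex : ∀ t ∈ PySem.List.sorted intervals (fun x => x), t ≤ mx := by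
    intro t ht
    exact hmax t ((PySem.List.mem_sorted _ _ _ _).mp ht)
  obtain ⟨p', d', hfold⟩ := pvFoldB (pvDivs mx) mx hmxd
    (PySem.List.sorted intervals (fun x => x)) hsortx hlex
    0 0 ((pvDivs mx).getD 0 0) hlen (List.getD_eq_getElem (pvDivs mx) 0 hlen)
    (fun t ht j hj hj0 => by omega)
  rw [hfold]
  simp only [zero_add]
  have hperm : ((PySem.List.sorted intervals (fun x => x)).map
        (fun t => (pvFirstGe (pvDivs mx) t).getD 0)).sum
      = (intervals.map (fun t => (pvFirstGe (pvDivs mx) t).getD 0)).sum :=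
    ((PySem.List.sorted_perm intervals (fun x => x) false).map _).sum_eq
  rw [hperm]
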